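-- pv_equiv track=rewrite | github.com/AlekseyChirkin/mixed_test_files | task_48_from_tg.py | infinite
-- ===== SOURCE A (Python) =====
-- def infinite(lst: list, tries: int) -> str:
--     result = []
--     i = j = 0
--     while i < tries:
--         result.append(lst[j])
--         i += 1
--         j += 1
--         if j == len(lst):
--             j = 0
--     return "".join([str(x) for x in result])
-- ===== SOURCE B (Python) =====
-- def infinite(lst: list, tries: int) -> str:
--     if tries <= 0:
--         return ""
--     strs = [str(x) for x in lst]
--     q, r = divmod(tries, len(lst))
--     return "".join(strs * q + strs[:r])
-- ===== Notes on version B (the rewrite author's own statement) =====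
-- stated objective: simpler
-- what changed: Replaces the element-by-element while loop with a wrapping index by a closed form: divmod(tries, len(lst)) gives how many full copies of the list plus which prefix to append, joined once.
import Mathlib
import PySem

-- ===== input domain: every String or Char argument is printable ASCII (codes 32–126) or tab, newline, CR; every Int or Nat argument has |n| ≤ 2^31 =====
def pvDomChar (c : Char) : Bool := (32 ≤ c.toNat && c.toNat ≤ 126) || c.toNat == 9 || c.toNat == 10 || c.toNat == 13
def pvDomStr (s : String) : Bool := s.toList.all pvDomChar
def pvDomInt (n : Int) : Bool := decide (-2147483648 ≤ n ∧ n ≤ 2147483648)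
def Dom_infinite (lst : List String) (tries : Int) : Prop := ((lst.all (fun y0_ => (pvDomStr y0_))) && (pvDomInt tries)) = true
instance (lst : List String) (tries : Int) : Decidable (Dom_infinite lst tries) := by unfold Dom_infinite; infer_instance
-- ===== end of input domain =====

-- B replaces the element-by-element while loop (wrapping index) by the closed form
-- divmod(tries, len(lst)): full copies of the list plus a prefix, joined once.

-- ===== PORT A =====
-- the while loop: state (i, j, result); lst[j] raises IndexError on empty lst (pyGet? = none;
-- that input is excluded by Pre_infinite, the port then returns the accumulator)
def infiniteLoopA (lst : List String) (tries : Int) (i j : Int) (result : List String) : List String :=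
  if i < tries then
    match PySem.List.pyGet? lst j with
    | none => result
    | some x =>
        infiniteLoopA lst tries (i + 1)
          (if j + 1 = (lst.length : Int) then 0 else j + 1) (result ++ [x])
  else result
termination_by (tries - i).toNat
decreasing_by omega

def infinite (lst : List String) (tries : Int) : String :=
  -- "".join([str(x) for x in result]); str(x) on a str is x itself
  PySem.Str.join "" ((infiniteLoopA lst tries 0 0 []).map (fun x => x))

-- ===== PORT B =====
def infinite_alt (lst : List String) (tries : Int) : String :=
  if tries ≤ 0 then ""
  else
    let strs := lst.map (fun x => x)   -- [str(x) for x in lst]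
    match PySem.Int.divmod? tries (lst.length : Int) with
    | none => ""   -- ZeroDivisionError in Python (empty lst, tries > 0); excluded by Pre_infinite
    | some (q, r) =>
        PySem.Str.join "" (PySem.List.pyRepeat strs q ++ PySem.List.slice strs none (some r))

-- ===== PRECONDITION & SPEC =====
-- Pre_ excludes exactly the inputs where A raises: empty lst with tries > 0 (IndexError at lst[0]).
def Pre_infinite (lst : List String) (tries : Int) : Prop := tries ≤ 0 ∨ lst ≠ []
instance (lst : List String) (tries : Int) : Decidable (Pre_infinite lst tries) := by
  unfold Pre_infinite; infer_instance

def pvWitness_infinite : List String × Int := (["ab", "c"], 5)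

def Spec_infinite (lst : List String) (tries : Int) (out : String) : Prop := out = infinite_alt lst tries
instance (lst : List String) (tries : Int) (out : String) : Decidable (Spec_infinite lst tries out) := by
  unfold Spec_infinite; infer_instance

-- ===== CLAIM (what is proved, stated in full; the proofs are below) =====
def Claim_equal_infinite : Prop := ∀ (lst : List String) (tries : Int), Dom_infinite lst tries → Pre_infinite lst tries → Spec_infinite lst tries (infinite lst tries)

-- ===== LEMMAS AND PROOFS =====

-- the sequence of elements A's loop appends: n elements cycled from index j
def cycTake (lst : List String) : Nat → Nat → List String
  | 0, _ => []
  | n + 1, j => lst.getD j "" :: cycTake lst n (if j + 1 = lst.length then 0 else j + 1)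

theorem infiniteLoopA_eq_cycTake (lst : List String) (n : Nat) :
    ∀ (tries i : Int) (j : Nat) (acc : List String),
      tries - i = (n : Int) → j < lst.length →
      infiniteLoopA lst tries i (j : Int) acc = acc ++ cycTake lst n j := by
  induction n with
  | zero =>
      intro tries i j acc hn hj
      rw [infiniteLoopA]
      simp [cycTake, show ¬ i < tries by omega]
  | succ n ih =>
      intro tries i j acc hn hj
      rw [infiniteLoopA]
      have hlt : i < tries := by omega
      rw [if_pos hlt]
      rw [PySem.List.pyGet?_natCast, List.getElem?_eq_getElem hj]
      simp only [cycTake]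
      have hgd : lst.getD j "" = lst[j] := List.getD_eq_getElem lst "" hj
      by_cases hje : j + 1 = lst.length
      · have : ((j : Int) + 1 = (lst.length : Int)) := by exact_mod_cast hje
        rw [if_pos this, show (0 : Int) = ((0 : Nat) : Int) from rfl,
          ih tries (i + 1) 0 (acc ++ [lst[j]]) (by omega) (by omega),
          if_pos hje, hgd, List.append_assoc]
        rfl
      · have : ¬ ((j : Int) + 1 = (lst.length : Int)) := by
          intro h; exact hje (by exact_mod_cast h)
        rw [if_neg this, show (j : Int) + 1 = ((j + 1 : Nat) : Int) by push_cast; ring,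
          ih tries (i + 1) (j + 1) (acc ++ [lst[j]]) (by omega) (by omega),
          if_neg hje, hgd, List.append_assoc]
        rfl

theorem cycTake_le (lst : List String) (n : Nat) :
    ∀ j : Nat, j + n ≤ lst.length → cycTake lst n j = (lst.drop j).take n := by
  induction n with
  | zero => intro j _; simp [cycTake]
  | succ n ih =>
      intro j hjn
      have hj : j < lst.length := by omega
      rw [cycTake, List.drop_eq_getElem_cons hj, List.take_succ_cons,
        List.getD_eq_getElem lst "" hj]
      by_cases hje : j + 1 = lst.length
      · have hn0 : n = 0 := by omega
        subst hn0
        simp [cycTake]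
      · rw [if_neg hje, ih (j + 1) (by omega)]

theorem cycTake_wrap (lst : List String) (n : Nat) :
    ∀ j : Nat, j < lst.length → lst.length - j ≤ n →
      cycTake lst n j = lst.drop j ++ cycTake lst (n - (lst.length - j)) 0 := by
  induction n with
  | zero => intro j hj hlen; omega
  | succ n ih =>
      intro j hj hlen
      rw [cycTake, List.drop_eq_getElem_cons hj, List.getD_eq_getElem lst "" hj]
      by_cases hje : j + 1 = lst.length
      · rw [if_pos hje,
          show lst.drop (j + 1) = [] by rw [hje]; simp,
          show n + 1 - (lst.length - j) = n by omega]
        simp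
      · rw [if_neg hje, ih (j + 1) (by omega) (by omega),
          show n - (lst.length - (j + 1)) = n + 1 - (lst.length - j) by omega,
          List.cons_append]

theorem cycTake_closed (lst : List String) (hl : lst ≠ []) (n : Nat) :
    cycTake lst n 0 =
      (List.replicate (n / lst.length) lst).flatten ++ lst.take (n % lst.length) := by
  induction n using Nat.strong_induction_on with
  | _ n ih =>
    have hL : 0 < lst.length := List.length_pos_iff.mpr hl
    by_cases hlt : n < lst.length
    · rw [cycTake_le lst n 0 (by omega), Nat.div_eq, Nat.mod_eq]
      rw [if_neg (by omega), if_neg (by omega)]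
      simp
    · have hle : lst.length ≤ n := by omega
      rw [cycTake_wrap lst n 0 hL (by omega), Nat.div_eq, Nat.mod_eq,
        if_pos ⟨hL, hle⟩, if_pos ⟨hL, hle⟩, List.replicate_succ, List.flatten_cons,
        show n - (lst.length - 0) = n - lst.length by omega,
        ih (n - lst.length) (by omega), List.drop_zero, List.append_assoc]

theorem divmod?_pos (a b : Int) (ha : 0 < a) (hb : 0 < b) :
    PySem.Int.divmod? a b = some (((a.toNat / b.toNat : Nat) : Int), ((a.toNat % b.toNat : Nat) : Int)) := by
  unfold PySem.Int.divmod?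
  rw [if_neg (by omega)]
  have h1 : a.fdiv b = (a.toNat : Int).fdiv (b.toNat : Int) := by
    rw [Int.toNat_of_nonneg (by omega), Int.toNat_of_nonneg (by omega)]
  have h2 : a.fmod b = (a.toNat : Int).fmod (b.toNat : Int) := by
    rw [Int.toNat_of_nonneg (by omega), Int.toNat_of_nonneg (by omega)]
  rw [h1, h2]
  simp [Int.fdiv_eq_ediv, Int.fmod_eq_emod]

-- ===== VERDICT (by name: the statement is the Claim_ definition above) =====
theorem infinite_spec : Claim_equal_infinite := by
  intro lst tries _ hpre
  unfold Spec_infinite infinite infinite_alt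
  by_cases ht : tries ≤ 0
  · rw [if_pos ht, infiniteLoopA, if_neg (by omega)]
    rfl
  · have htpos : 0 < tries := by omega
    have hl : lst ≠ [] := by
      rcases hpre with h | h
      · omega
      · exact h
    have hL : 0 < lst.length := List.length_pos_iff.mpr hl
    rw [if_neg ht,
      divmod?_pos tries (lst.length : Int) htpos (by exact_mod_cast hL)]
    simp only [List.map_id_fun', id, Int.toNat_natCast]
    rw [show (0 : Int) = ((0 : Nat) : Int) from rfl,
      infiniteLoopA_eq_cycTake lst tries.toNat tries (((0:Nat)):Int) 0 [] (by omega) hL,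
      List.nil_append, cycTake_closed lst hl tries.toNat,
      PySem.List.slice_to_natCast]
    simp [PySem.List.pyRepeat]
    congr 3
    rw [show max tries 0 = ((tries.toNat : Nat) : Int) by omega, ← Int.natCast_div,
      Int.toNat_natCast]
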